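-- pv_equiv track=rewrite | github.com/kimyubi/ps | 코테/프로그래머스 광물 캐기.py | solution
-- ===== SOURCE A (Python) =====
-- def solution(picks, minerals):
--     answer = 0
--     # dia, iron, stone -> 다이아 곡괭이의 수, 철 곡괭이의 수, 돌 곡괭이의 수
--     dia, iron, stone = picks[0], picks[1], picks[2]
--
--     # 곡괭이 사용 가능 횟수보다 광물의 수가 더 많으면
--     # 곡괭이의 사용 가능 횟수를 초과하는 광물은 캘 수 없다.
--     if(sum(picks) * 5 < len(minerals)):
--         minerals = minerals[:sum(picks) * 5]
--
--     # 광물을 5개 묶음으로 나누기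
--     chuncs = [minerals[i:i + 5] for i in range(0, len(minerals), 5)]
--     counter = []
--     for chunc in chuncs:
--         dia_cnt = chunc.count("diamond")
--         iron_cnt = chunc.count("iron")
--         stone_cnt = chunc.count("stone")
--
--         counter.append([dia_cnt, iron_cnt, stone_cnt])
--     # 귀한 광물이 더 많이 포함된 청크를 앞에 오도록 정렬한다.
--     counter.sort(key=lambda x: (-x[0], -x[1], -x[2]))
--
--     for x in counter:
--         # 다이아 곡괭이로 광물을 캐는 경우
--         if dia > 0:
--             answer += sum(x)
--             dia -= 1
--             continue
--         # 철 곡괭이로 광물을 캐는 경우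
--         elif iron > 0:
--             answer += x[0] * 5 + x[1] + x[2]
--             iron -= 1
--             continue
--         # 돌 곡괭이로 광물을 캐는 경우
--         elif stone > 0:
--             answer += x[0] * 25 + x[1] * 5 + x[2]
--             stone -=1
--             continue
--         # 쓸 수 있는 곡괭이가 하나도 없는 경우
--         else:
--             break
--
--     return answer
-- ===== SOURCE B (Python) =====
-- def solution(picks, minerals):
--     dia, iron, stone = picks[0], picks[1], picks[2]
--     cap = sum(picks) * 5
--     if cap < len(minerals):
--         minerals = minerals[:cap]
--     # Bucket-count the 5-chunks by their (diamond, iron, stone) counts: keys are bounded by 0..5,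
--     # so a counting pass replaces the comparison sort.
--     buckets = {}
--     for i in range(0, len(minerals), 5):
--         chunk = minerals[i:i + 5]
--         key = (chunk.count("diamond"), chunk.count("iron"), chunk.count("stone"))
--         buckets[key] = buckets.get(key, 0) + 1
--     answer = 0
--     # Walk the bounded key space in the order the sort would have produced.
--     for d in range(5, -1, -1):
--         for j in range(5, -1, -1):
--             for s in range(5, -1, -1):
--                 for _ in range(buckets.get((d, j, s), 0)):
--                     if dia > 0:
--                         answer += d + j + s
--                         dia -= 1
--                     elif iron > 0:
--                         answer += d * 5 + j + s
--                         iron -= 1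
--                     elif stone > 0:
--                         answer += d * 25 + j * 5 + s
--                         stone -= 1
--                     else:
--                         return answer
--     return answer
-- ===== Notes on version B (the rewrite author's own statement) =====
-- stated objective: alternative
-- what changed: B replaces A's comparison sort of the per-chunk (diamond,iron,stone) count triples by a counting/bucket pass over the bounded key space: it tallies chunks per triple in a dict and then walks the 6x6x6 key cube in descending order, so no sort is performed (asymptotically O(n) vs O(n log n), but the chunk-counting pass dominates and a timing run showed no measurable speed-up).
import Mathlib
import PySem

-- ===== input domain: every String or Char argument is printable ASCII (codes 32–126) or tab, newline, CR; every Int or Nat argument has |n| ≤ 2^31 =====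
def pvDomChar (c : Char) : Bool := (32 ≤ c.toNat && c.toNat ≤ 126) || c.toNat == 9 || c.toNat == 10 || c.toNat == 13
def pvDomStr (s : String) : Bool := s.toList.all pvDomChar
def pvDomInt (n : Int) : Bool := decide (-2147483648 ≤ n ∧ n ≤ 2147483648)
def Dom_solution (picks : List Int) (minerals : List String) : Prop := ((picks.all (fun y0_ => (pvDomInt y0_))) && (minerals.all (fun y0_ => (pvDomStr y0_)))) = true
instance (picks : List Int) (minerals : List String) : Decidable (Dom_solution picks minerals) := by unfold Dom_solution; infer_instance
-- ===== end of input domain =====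

-- B replaces A's comparison sort of the bounded (0..5)³ chunk-count triples by a counting/bucket
-- pass (tally chunks per triple in a dict, then walk the key cube in descending order); objective:
-- alternative algorithm (no measured speed difference).

-- ===== PORT A =====
-- both Pythons count a 5-chunk's diamonds/irons/stones the same way (Python's list of 3 ints → triple)
def cnt3 (c : List String) : Int × Int × Int :=
  ((PySem.List.count c "diamond" : Int), (PySem.List.count c "iron" : Int),
   (PySem.List.count c "stone" : Int))

-- both Pythons' mining loop body is textually identical: state (dia, iron, stone, answer);
-- A's 'break' / B's 'return answer' are exact as a no-op, since the else branch changes nothing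
-- and every later iteration stays in it.
def mineStep (st : Int × Int × Int × Int) (x : Int × Int × Int) : Int × Int × Int × Int :=
  if st.1 > 0 then (st.1 - 1, st.2.1, st.2.2.1, st.2.2.2 + (x.1 + x.2.1 + x.2.2))
  else if st.2.1 > 0 then (st.1, st.2.1 - 1, st.2.2.1, st.2.2.2 + (x.1 * 5 + x.2.1 + x.2.2))
  else if st.2.2.1 > 0 then (st.1, st.2.1, st.2.2.1 - 1, st.2.2.2 + (x.1 * 25 + x.2.1 * 5 + x.2.2))
  else st

-- A's sort key lambda x: (-x[0], -x[1], -x[2]) — Python tuple comparison is lexicographic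
def pyKey3 (x : Int × Int × Int) : Lex (Int × Lex (Int × Int)) :=
  toLex (-x.1, toLex (-x.2.1, -x.2.2))

def solution (picks : List Int) (minerals : List String) : Int :=
  let dia := PySem.List.pyGetD picks 0 0     -- picks[0..2]; IndexError when len < 3 → Pre_
  let iron := PySem.List.pyGetD picks 1 0
  let stone := PySem.List.pyGetD picks 2 0
  let ms := if picks.sum * 5 < (minerals.length : Int)
            then PySem.List.slice minerals none (some (picks.sum * 5)) else minerals
  let chuncs := (PySem.List.pyRange 0 (ms.length : Int) 5).map
      (fun i => PySem.List.slice ms (some i) (some (i + 5)))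
  let counter := chuncs.foldl (fun acc c => acc ++ [cnt3 c]) []
  let counterS := PySem.List.sorted counter pyKey3 false
  (counterS.foldl mineStep (dia, iron, stone, 0)).2.2.2

-- ===== PORT B =====
def solution_alt (picks : List Int) (minerals : List String) : Int :=
  let dia := PySem.List.pyGetD picks 0 0
  let iron := PySem.List.pyGetD picks 1 0
  let stone := PySem.List.pyGetD picks 2 0
  let cap := picks.sum * 5
  let ms := if cap < (minerals.length : Int)
            then PySem.List.slice minerals none (some cap) else minerals
  let buckets : PySem.Dict (Int × Int × Int) Int :=
    (PySem.List.pyRange 0 (ms.length : Int) 5).foldl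
      (fun b i => b.modify (cnt3 (PySem.List.slice ms (some i) (some (i + 5)))) 0 (· + 1))
      PySem.Dict.empty
  ((PySem.List.pyRange 5 (-1) (-1)).foldl (fun st d =>
    (PySem.List.pyRange 5 (-1) (-1)).foldl (fun st j =>
      (PySem.List.pyRange 5 (-1) (-1)).foldl (fun st s =>
        (PySem.List.pyRange 0 (buckets.getD (d, j, s) 0) 1).foldl
          (fun st _ => mineStep st (d, j, s)) st) st) st)
    (dia, iron, stone, 0)).2.2.2

-- ===== PRECONDITION & SPEC =====
-- A reads picks[0], picks[1], picks[2]: IndexError (both Pythons) when picks has fewer than 3 elements.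
def Pre_solution (picks : List Int) (minerals : List String) : Prop := 3 ≤ picks.length
instance (picks : List Int) (minerals : List String) : Decidable (Pre_solution picks minerals) := by
  unfold Pre_solution; infer_instance
def pvWitness_solution : List Int × List String :=
  ([1, 1, 1], ["diamond", "stone", "stone", "iron", "gold", "stone", "diamond"])

def Spec_solution (picks : List Int) (minerals : List String) (out : Int) : Prop := out = solution_alt picks minerals
instance (picks : List Int) (minerals : List String) (out : Int) : Decidable (Spec_solution picks minerals out) := by unfold Spec_solution; infer_instance

-- ===== CLAIM (what is proved, stated in full; the proofs are below) =====
def Claim_equal_solution : Prop := ∀ (picks : List Int) (minerals : List String), Dom_solution picks minerals → Pre_solution picks minerals → Spec_solution picks minerals (solution picks minerals)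

-- ===== LEMMAS AND PROOFS =====

-- proof-side abbreviations for the parts the two ports share textually
def msT (picks : List Int) (minerals : List String) : List String :=
  if picks.sum * 5 < (minerals.length : Int)
  then PySem.List.slice minerals none (some (picks.sum * 5)) else minerals

def ctr (ms : List String) : List (Int × Int × Int) :=
  (PySem.List.pyRange 0 (ms.length : Int) 5).map
    (fun i => cnt3 (PySem.List.slice ms (some i) (some (i + 5))))

def st0 (picks : List Int) : Int × Int × Int × Int :=
  (PySem.List.pyGetD picks 0 0, PySem.List.pyGetD picks 1 0, PySem.List.pyGetD picks 2 0, 0)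

-- the 6×6×6 key cube in the descending order B walks it
def keysDesc : List (Int × Int × Int) :=
  (PySem.List.pyRange 5 (-1) (-1)).flatMap fun d =>
    (PySem.List.pyRange 5 (-1) (-1)).flatMap fun j =>
      (PySem.List.pyRange 5 (-1) (-1)).map fun s => (d, j, s)

lemma solution_eq_sorted (picks : List Int) (minerals : List String) :
    solution picks minerals =
      ((PySem.List.sorted (ctr (msT picks minerals)) pyKey3 false).foldl mineStep
        (st0 picks)).2.2.2 := by
  simp only [solution, PySem.List.foldl_append_singleton_eq_map, List.map_map, ctr, msT, st0,
    List.nil_append, Function.comp_def]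

lemma buckets_getD (ms : List String) (k : Int × Int × Int) :
    (((PySem.List.pyRange 0 (ms.length : Int) 5).foldl
        (fun b i => b.modify (cnt3 (PySem.List.slice ms (some i) (some (i + 5)))) 0 (· + 1))
        PySem.Dict.empty : PySem.Dict (Int × Int × Int) Int)).getD k 0
      = (List.count k (ctr ms) : Int) := by
  have h := PySem.Dict.getD_foldl_modify_add_one (ctr ms)
      (PySem.Dict.empty : PySem.Dict (Int × Int × Int) Int) k
  rw [ctr, List.foldl_map] at h
  simpa using h

lemma foldl_const_pyRange (k : Int × Int × Int) :
    ∀ (c : Nat) (st : Int × Int × Int × Int),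
      (PySem.List.pyRange 0 (c : Int) 1).foldl (fun st _ => mineStep st k) st
        = (List.replicate c k).foldl mineStep st := by
  intro c
  induction c with
  | zero => intro st; simp [PySem.List.pyRange_one_eq_nil]
  | succ n ih =>
    intro st
    have hr : PySem.List.pyRange 0 ((n : Int) + 1) 1
        = PySem.List.pyRange 0 (n : Int) 1 ++ [(n : Int)] :=
      PySem.List.pyRange_one_succ_right (by exact_mod_cast Int.natCast_nonneg n)
    have : ((n + 1 : Nat) : Int) = (n : Int) + 1 := by push_cast; ring
    rw [this, hr, List.foldl_append, ih, List.replicate_succ', List.foldl_append]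
    rfl

lemma solution_alt_eq_expand (picks : List Int) (minerals : List String) :
    solution_alt picks minerals =
      ((keysDesc.flatMap fun k =>
          List.replicate (List.count k (ctr (msT picks minerals))) k).foldl mineStep
        (st0 picks)).2.2.2 := by
  simp only [solution_alt, buckets_getD, foldl_const_pyRange, keysDesc, List.foldl_flatMap,
    List.foldl_map, msT, st0]

-- any list drawn from a duplicate-free key list is a permutation of its bucket expansion
lemma perm_expand {α : Type} [BEq α] [LawfulBEq α] :
    ∀ (ks : List α) (xs : List α), ks.Nodup → (∀ x ∈ xs, x ∈ ks) →
      (ks.flatMap fun k => List.replicate (List.count k xs) k).Perm xs := by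
  intro ks
  induction ks with
  | nil =>
    intro xs _ hsub
    have : xs = [] := List.eq_nil_iff_forall_not_mem.2 (fun a ha => by simpa using hsub a ha)
    simp [this]
  | cons k ks ih =>
    intro xs hnd hsub
    have hk : k ∉ ks := (List.nodup_cons.1 hnd).1
    have hnd' : ks.Nodup := (List.nodup_cons.1 hnd).2
    set ys := xs.filter (fun x => !(x == k)) with hys
    have htail : (ks.flatMap fun q => List.replicate (List.count q xs) q)
        = ks.flatMap fun q => List.replicate (List.count q ys) q := by
      apply List.flatMap_congr
      intro q hq
      have hqk : (fun x => !(x == k)) q = true := by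
        simp only [Bool.not_eq_eq_eq_not, Bool.not_true, beq_eq_false_iff_ne]
        exact fun h => hk (h ▸ hq)
      rw [hys, List.count_filter (p := fun x => !(x == k)) (a := q) (l := xs) hqk]
    have hsub' : ∀ x ∈ ys, x ∈ ks := by
      intro x hx
      rcases List.mem_filter.1 hx with ⟨hxxs, hxk⟩
      rcases List.mem_cons.1 (hsub x hxxs) with h | h
      · exact absurd h (by simpa using hxk)
      · exact h
    have hperm : (ks.flatMap fun q => List.replicate (List.count q ys) q).Perm ys :=
      ih ys hnd' hsub'
    have e1 : ((k :: ks).flatMap fun q => List.replicate (List.count q xs) q)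
        = xs.filter (fun x => x == k)
            ++ ks.flatMap fun q => List.replicate (List.count q ys) q := by
      rw [List.flatMap_cons, ← List.filter_beq, htail]
    rw [e1]
    exact (hperm.append_left _).trans (List.filter_append_perm _ xs)

-- the expansion of a strictly key-increasing key list is key-sorted
lemma pairwise_expand {α κ : Type} [LinearOrder κ] (key : α → κ) :
    ∀ (ks : List α), ks.Pairwise (fun a b => key a < key b) → ∀ (n : α → Nat),
      (ks.flatMap fun k => List.replicate (n k) k).Pairwise (fun a b => key a ≤ key b) := by
  intro ks
  induction ks with
  | nil => intro _ n; simp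
  | cons k ks ih =>
    intro hp n
    rcases List.pairwise_cons.1 hp with ⟨hk, hks⟩
    rw [List.flatMap_cons, List.pairwise_append]
    refine ⟨List.pairwise_replicate.2 (Or.inr le_rfl), ih hks n, ?_⟩
    intro a ha b hb
    rcases List.mem_flatMap.1 hb with ⟨q, hq, hbq⟩
    rw [List.eq_of_mem_replicate ha, List.eq_of_mem_replicate hbq]
    exact (hk q hq).le

lemma pyKey3_inj : Function.Injective pyKey3 := by
  intro a b h
  simp only [pyKey3, toLex_inj, Prod.mk.injEq, neg_inj] at h
  obtain ⟨h1, h2, h3⟩ := h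
  exact Prod.ext h1 (Prod.ext h2 h3)

set_option maxHeartbeats 2000000 in
set_option maxRecDepth 20000 in
lemma keysDesc_pairwise : keysDesc.Pairwise (fun a b => pyKey3 a < pyKey3 b) := by decide

set_option maxRecDepth 20000 in
lemma keysDesc_nodup : keysDesc.Nodup := by decide

lemma ctr_sub_keysDesc (ms : List String) : ∀ x ∈ ctr ms, x ∈ keysDesc := by
  intro x hx
  simp only [ctr, List.mem_map] at hx
  obtain ⟨i, hi, rfl⟩ := hx
  have hi0 : 0 ≤ i := ((PySem.List.mem_pyRange_iff_of_pos (by norm_num) i).1 hi).1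
  have hlen : (PySem.List.slice ms (some i) (some (i + 5))).length ≤ 5 := by
    rw [PySem.List.slice_toNat ms hi0 (by omega)]
    have h5 : (i + 5).toNat - i.toNat = 5 := by omega
    calc (List.take ((i + 5).toNat - i.toNat) (List.drop i.toNat ms)).length
        ≤ (i + 5).toNat - i.toNat := List.length_take_le _ _
      _ = 5 := h5
  have hcnt : ∀ w : String,
      (0 : Int) ≤ (PySem.List.count (PySem.List.slice ms (some i) (some (i + 5))) w : Int) ∧
      ((PySem.List.count (PySem.List.slice ms (some i) (some (i + 5))) w : Int)) ≤ 5 := by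
    intro w
    constructor
    · exact Int.natCast_nonneg _
    · have := List.count_le_length (a := w) (l := PySem.List.slice ms (some i) (some (i + 5)))
      have hle : PySem.List.count (PySem.List.slice ms (some i) (some (i + 5))) w ≤ 5 := by
        simpa [PySem.List.count] using le_trans this hlen
      exact_mod_cast hle
  have hmem : ∀ z : Int, 0 ≤ z → z ≤ 5 → z ∈ PySem.List.pyRange 5 (-1) (-1) := by
    intro z h0 h5
    rw [PySem.List.mem_pyRange_neg_one]
    omega
  simp only [keysDesc, List.mem_flatMap, List.mem_map]
  refine ⟨(cnt3 _).1, hmem _ (hcnt "diamond").1 (hcnt "diamond").2,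
          (cnt3 _).2.1, hmem _ (hcnt "iron").1 (hcnt "iron").2,
          (cnt3 _).2.2, hmem _ (hcnt "stone").1 (hcnt "stone").2, rfl⟩

lemma sorted_eq_expand (xs : List (Int × Int × Int)) (hsub : ∀ x ∈ xs, x ∈ keysDesc) :
    PySem.List.sorted xs pyKey3 false
      = keysDesc.flatMap fun k => List.replicate (List.count k xs) k := by
  refine PySem.List.eq_of_perm_of_pairwise_le_of_injective pyKey3 pyKey3_inj ?_ ?_ ?_
  · exact (PySem.List.sorted_perm xs pyKey3 false).trans
      (perm_expand keysDesc xs keysDesc_nodup hsub).symm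
  · exact PySem.List.sorted_pairwise xs pyKey3
  · exact pairwise_expand pyKey3 keysDesc keysDesc_pairwise _

theorem solution_eq_alt (picks : List Int) (minerals : List String) :
    solution picks minerals = solution_alt picks minerals := by
  rw [solution_eq_sorted, solution_alt_eq_expand,
    sorted_eq_expand _ (ctr_sub_keysDesc (msT picks minerals))]

-- ===== VERDICT (by name: the statement is the Claim_ definition above) =====
theorem solution_spec : Claim_equal_solution := by
  intro picks minerals _ _
  unfold Spec_solution
  exact solution_eq_alt picks minerals
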